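-- pv_equiv track=rewrite | github.com/posebear1990/twotwo-girl-danmaku-adventure | tools/extract_hero_frames.py | group_positions
-- ===== SOURCE A (Python) =====
-- def group_positions(mask: list[bool]) -> list[int]:
--     positions: list[int] = []
--     start: int | None = None
--     for index, is_line in enumerate(mask):
--         if is_line and start is None:
--             start = index
--         elif not is_line and start is not None:
--             positions.append((start + index - 1) // 2)
--             start = None
--
--     if start is not None:
--         positions.append((start + len(mask) - 1) // 2)
--
--     return positions
-- ===== SOURCE B (Python) =====
-- from itertools import groupby
--
--
-- def group_positions(mask: list[bool]) -> list[int]: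
--     positions: list[int] = []
--     for key, group in groupby(enumerate(mask), key=lambda p: p[1]):
--         if key:
--             indices = [i for i, _ in group]
--             positions.append((indices[0] + indices[-1]) // 2)
--     return positions
-- ===== Notes on version B (the rewrite author's own statement) =====
-- stated objective: idiomatic
-- what changed: Replaced the explicit start/None state machine with its separate trailing-run branch by itertools.groupby over enumerate: each True run is a group, and the midpoint is (first index + last index) // 2, so the open-run sentinel and the post-loop special case disappear.
import Mathlib
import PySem

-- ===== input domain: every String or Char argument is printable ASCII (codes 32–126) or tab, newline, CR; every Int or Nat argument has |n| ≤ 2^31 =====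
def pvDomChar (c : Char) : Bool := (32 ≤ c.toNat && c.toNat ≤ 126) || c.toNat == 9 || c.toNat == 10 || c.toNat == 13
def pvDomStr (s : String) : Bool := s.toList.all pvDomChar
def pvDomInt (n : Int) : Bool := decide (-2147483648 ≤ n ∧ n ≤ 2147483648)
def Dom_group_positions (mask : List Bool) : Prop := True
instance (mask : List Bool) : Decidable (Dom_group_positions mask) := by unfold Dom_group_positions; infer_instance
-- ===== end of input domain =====

-- B replaces A's start/None state machine (with its separate trailing-run branch) by grouping
-- consecutive equal booleans (itertools.groupby over enumerate) and taking
-- (first index + last index) // 2 of each True run: an idiomatic decomposition, same O(n) cost.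

-- ===== PORT A =====
-- the for-loop over enumerate(mask) carrying (positions, start); index carried explicitly
def group_positions_loop (index : Int) (positions : List Int) (start : Option Int) :
    List Bool → List Int × Option Int
  | [] => (positions, start)
  | is_line :: rest =>
    if is_line && start.isNone then
      group_positions_loop (index + 1) positions (some index) rest
    else if !is_line && start.isSome then
      group_positions_loop (index + 1)
        (positions ++ [PySem.Int.floordiv (start.getD 0 + index - 1) 2]) none rest
    else
      group_positions_loop (index + 1) positions start rest

def group_positions (mask : List Bool) : List Int :=
  match group_positions_loop 0 [] none mask with
  | (positions, some s) => positions ++ [PySem.Int.floordiv (s + (mask.length : Int) - 1) 2]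
  | (positions, none) => positions

-- ===== PORT B =====
-- enumerate(mask): pairs (index, value), indices from 0
def pvEnumFrom (i : Int) : List Bool → List (Int × Bool)
  | [] => []
  | x :: xs => (i, x) :: pvEnumFrom (i + 1) xs

-- itertools.groupby: split into maximal runs with equal key (the boolean); keep (key, indices)
def pvRunGroups : List (Int × Bool) → List (Bool × List Int)
  | [] => []
  | (i, b) :: rest =>
    (b, i :: (rest.takeWhile (fun p => p.2 == b)).map Prod.fst) ::
      pvRunGroups (rest.dropWhile (fun p => p.2 == b))
  termination_by l => l.length
  decreasing_by
    simp only [List.length_cons]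
    exact Nat.lt_succ_of_le (List.length_dropWhile_le _ _)

def group_positions_alt (mask : List Bool) : List Int :=
  (pvRunGroups (pvEnumFrom 0 mask)).filterMap fun g =>
    if g.1 then
      match g.2 with
      | [] => none
      | f :: rest => some (PySem.Int.floordiv (f + (f :: rest).getLastD f) 2)
    else none

-- ===== PRECONDITION & SPEC =====
def Spec_group_positions (mask : List Bool) (out : List Int) : Prop := out = group_positions_alt mask
instance (mask : List Bool) (out : List Int) : Decidable (Spec_group_positions mask out) := by unfold Spec_group_positions; infer_instance

-- ===== CLAIM (what is proved, stated in full; the proofs are below) =====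
def Claim_equal_group_positions : Prop := ∀ (mask : List Bool), Dom_group_positions mask → Spec_group_positions mask (group_positions mask)

-- ===== LEMMAS AND PROOFS =====

-- canonical characterisation: scan with no open run (pvSpecN) / an open run started at s (pvSpecR)
mutual
def pvSpecN (i : Int) : List Bool → List Int
  | [] => []
  | false :: xs => pvSpecN (i + 1) xs
  | true :: xs => pvSpecR i (i + 1) xs

def pvSpecR (s i : Int) : List Bool → List Int
  | [] => [PySem.Int.floordiv (s + i - 1) 2]
  | true :: xs => pvSpecR s (i + 1) xs
  | false :: xs => PySem.Int.floordiv (s + i - 1) 2 :: pvSpecN (i + 1) xs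
end

def pvFinish (n : Int) : List Int × Option Int → List Int
  | (positions, some s) => positions ++ [PySem.Int.floordiv (s + n - 1) 2]
  | (positions, none) => positions

theorem loopA_spec (xs : List Bool) : ∀ (i : Int) (acc : List Int),
    pvFinish (i + xs.length) (group_positions_loop i acc none xs) = acc ++ pvSpecN i xs ∧
    ∀ s, pvFinish (i + xs.length) (group_positions_loop i acc (some s) xs)
        = acc ++ pvSpecR s i xs := by
  induction xs with
  | nil =>
    intro i acc
    constructor
    · simp [group_positions_loop, pvFinish, pvSpecN]
    · intro s; simp [group_positions_loop, pvFinish, pvSpecR]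
  | cons x xs ih =>
    intro i acc
    have hc : (i : Int) + ((x :: xs).length : Int) = (i + 1) + (xs.length : Int) := by
      simp [List.length_cons]; ring
    constructor
    · cases x with
      | true =>
        simp only [group_positions_loop, Option.isNone_none, Bool.and_true, if_pos]
        rw [hc]
        exact (ih (i + 1) acc).2 i
      | false =>
        simp only [group_positions_loop, Bool.false_and, Bool.not_false, Option.isSome_none,
          Bool.and_false, Bool.false_eq_true, if_false]
        rw [hc]
        exact (ih (i + 1) acc).1
    · intro s
      cases x with
      | true =>
        simp only [group_positions_loop, Option.isNone_some, Bool.and_false, Bool.not_true,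
          Bool.false_and, Bool.false_eq_true, if_false]
        rw [hc]
        exact (ih (i + 1) acc).2 s
      | false =>
        simp only [group_positions_loop, Bool.false_and, Bool.not_false, Option.isSome_some,
          Bool.and_true, Bool.false_eq_true, if_false, if_true, Option.getD_some]
        rw [hc]
        have h := (ih (i + 1) (acc ++ [PySem.Int.floordiv (s + i - 1) 2])).1
        rw [h, List.append_assoc]
        rfl

theorem portA_eq_spec (mask : List Bool) : group_positions mask = pvSpecN 0 mask := by
  have h := (loopA_spec mask 0 []).1
  simp only [zero_add, List.nil_append] at h
  unfold group_positions
  rw [← h]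
  cases hl : group_positions_loop 0 [] none mask with
  | mk positions start =>
    cases start <;> simp [pvFinish]

-- B-side lemmas
theorem head?_dropWhile_ne {α : Type} (p : α → Bool) :
    ∀ (xs : List α) (y : α), (xs.dropWhile p).head? = some y → p y = false := by
  intro xs
  induction xs with
  | nil => intro y h; simp [List.dropWhile] at h
  | cons x xs ih =>
    intro y h
    by_cases hx : p x = true
    · rw [List.dropWhile_cons, if_pos hx] at h
      exact ih y h
    · rw [List.dropWhile_cons, if_neg hx] at h
      simp at h
      subst h
      simpa using hx

theorem enumFrom_takeWhile (xs : List Bool) : ∀ (i : Int) (b : Bool),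
    (pvEnumFrom i xs).takeWhile (fun p => p.2 == b) = pvEnumFrom i (xs.takeWhile (· == b)) := by
  induction xs with
  | nil => intro i b; simp [pvEnumFrom]
  | cons x xs ih =>
    intro i b
    by_cases hx : (x == b) = true
    · simp [pvEnumFrom, List.takeWhile_cons, hx, ih]
    · have hx' : (x == b) = false := by simpa using hx
      simp [pvEnumFrom, List.takeWhile_cons, hx']

theorem enumFrom_dropWhile (xs : List Bool) : ∀ (i : Int) (b : Bool),
    (pvEnumFrom i xs).dropWhile (fun p => p.2 == b)
      = pvEnumFrom (i + (xs.takeWhile (· == b)).length) (xs.dropWhile (· == b)) := by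
  induction xs with
  | nil => intro i b; simp [pvEnumFrom]
  | cons x xs ih =>
    intro i b
    by_cases hx : (x == b) = true
    · simp only [pvEnumFrom, List.dropWhile_cons, List.takeWhile_cons, hx, if_pos,
        List.length_cons]
      rw [ih]
      congr 1
      push_cast
      ring
    · simp [pvEnumFrom, List.dropWhile_cons, List.takeWhile_cons, hx]

theorem enumFrom_map_fst_getLastD (xs : List Bool) : ∀ (i d : Int),
    ((pvEnumFrom i xs).map Prod.fst).getLastD d
      = if xs.isEmpty then d else i + xs.length - 1 := by
  induction xs with
  | nil => intro i d; simp [pvEnumFrom]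
  | cons x xs ih =>
    intro i d
    simp only [pvEnumFrom, List.map_cons, List.getLastD_cons, List.isEmpty_cons]
    rw [ih]
    cases xs with
    | nil => simp
    | cons y ys =>
      simp only [List.isEmpty_cons, List.length_cons]
      norm_num
      push_cast
      ring

theorem specN_skip_false (fs : List Bool) (hfs : ∀ b ∈ fs, b = false) :
    ∀ (i : Int) (xs : List Bool), pvSpecN i (fs ++ xs) = pvSpecN (i + fs.length) xs := by
  induction fs with
  | nil => intro i xs; simp
  | cons f fs ih =>
    intro i xs
    have hf : f = false := hfs f (by simp)
    subst hf
    have h := ih (fun b hb => hfs b (by simp [hb])) (i + 1) xs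
    simp only [List.cons_append, pvSpecN, List.length_cons, h]
    congr 1
    push_cast
    ring

theorem specR_skip_true (ts : List Bool) (hts : ∀ b ∈ ts, b = true) :
    ∀ (s i : Int) (xs : List Bool), pvSpecR s i (ts ++ xs) = pvSpecR s (i + ts.length) xs := by
  induction ts with
  | nil => intro s i xs; simp
  | cons t ts ih =>
    intro s i xs
    have ht : t = true := hts t (by simp)
    subst ht
    have h := ih (fun b hb => hts b (by simp [hb])) s (i + 1) xs
    simp only [List.cons_append, pvSpecR, List.length_cons, h]
    congr 1
    push_cast
    ring

theorem specR_close (s i : Int) (xs : List Bool) (hx : xs.head? ≠ some true) :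
    pvSpecR s i xs = PySem.Int.floordiv (s + i - 1) 2 :: pvSpecN i xs := by
  cases xs with
  | nil => simp [pvSpecR, pvSpecN]
  | cons x ys =>
    cases x with
    | true => simp at hx
    | false => simp [pvSpecR, pvSpecN]

theorem portB_run_bounded (n : Nat) : ∀ (xs : List Bool), xs.length ≤ n → ∀ (i : Int),
    ((pvRunGroups (pvEnumFrom i xs)).filterMap fun g =>
      if g.1 then
        match g.2 with
        | [] => none
        | f :: rest => some (PySem.Int.floordiv (f + (f :: rest).getLastD f) 2)
      else none) = pvSpecN i xs := by
  induction n with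
  | zero =>
    intro xs hn i
    have : xs = [] := List.eq_nil_of_length_eq_zero (Nat.le_zero.mp hn)
    subst this
    simp [pvEnumFrom, pvRunGroups, pvSpecN]
  | succ n ih =>
    intro xs hn i
    cases xs with
    | nil => simp [pvEnumFrom, pvRunGroups, pvSpecN]
    | cons x xs =>
      have hsplit : xs.takeWhile (· == x) ++ xs.dropWhile (· == x) = xs :=
        List.takeWhile_append_dropWhile
      have hlen : (xs.dropWhile (· == x)).length ≤ n := by
        have h1 := List.length_dropWhile_le (· == x) xs
        simp only [List.length_cons] at hn
        omega
      have hih := ih (xs.dropWhile (· == x)) hlen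
        (i + 1 + ((xs.takeWhile (· == x)).length : Int))
      cases x with
      | false =>
        have hts : ∀ b ∈ xs.takeWhile (· == false), b = false := by
          intro b hb
          simpa using (List.mem_takeWhile_imp hb)
        rw [show pvEnumFrom i (false :: xs) = (i, false) :: pvEnumFrom (i + 1) xs from rfl,
          pvRunGroups]
        simp only [List.filterMap_cons]
        rw [if_neg (by simp)]
        rw [enumFrom_dropWhile, hih]
        rw [show pvSpecN i (false :: xs) = pvSpecN (i + 1) xs from rfl]
        conv_rhs => rw [← hsplit]
        rw [specN_skip_false _ hts]
      | true =>
        have hts : ∀ b ∈ xs.takeWhile (· == true), b = true := by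
          intro b hb
          simpa using (List.mem_takeWhile_imp hb)
        have hhead : (xs.dropWhile (· == true)).head? ≠ some true := by
          intro h
          have := head?_dropWhile_ne (· == true) xs true h
          simp at this
        rw [show pvEnumFrom i (true :: xs) = (i, true) :: pvEnumFrom (i + 1) xs from rfl,
          pvRunGroups]
        simp only [List.filterMap_cons]
        rw [if_pos (by simp)]
        rw [enumFrom_takeWhile, enumFrom_dropWhile, hih]
        rw [show pvSpecN i (true :: xs) = pvSpecR i (i + 1) xs from rfl]
        conv_rhs => rw [← hsplit]
        rw [specR_skip_true _ hts, specR_close _ _ _ hhead]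
        simp only [List.getLastD_cons]
        rw [enumFrom_map_fst_getLastD]
        by_cases he : (xs.takeWhile (· == true)).isEmpty
        · have h0 : ((xs.takeWhile (· == true)).length : Int) = 0 := by
            simp [List.isEmpty_iff] at he
            simp [he]
          rw [if_pos he, h0]
          congr 1
          ring
        · rw [if_neg he]
          congr 2
          ring

theorem portB_eq_spec (mask : List Bool) : group_positions_alt mask = pvSpecN 0 mask := by
  unfold group_positions_alt
  exact portB_run_bounded mask.length mask (le_refl _) 0

-- ===== VERDICT (by name: the statement is the Claim_ definition above) =====
theorem group_positions_spec : Claim_equal_group_positions := by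
  intro mask _
  unfold Spec_group_positions
  rw [portA_eq_spec, portB_eq_spec]
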